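-- pv_equiv track=rewrite | github.com/OlimIsaac/Group-5-aws | core/management/commands/seed_curated_demo_data.py | _build_roster
-- ===== SOURCE A (Python) =====
-- PATIENT_NAME_POOL = [
--     ("Amara", "Bennett"),
--     ("Idris", "Cole"),
--     ("Nia", "Farrow"),
--     ("Kofi", "Hale"),
--     ("Leona", "Ibarra"),
--     ("Mateo", "Jensen"),
--     ("Priya", "Kapoor"),
--     ("Elias", "Navarro"),
--     ("Talia", "Okafor"),
--     ("Rowan", "Pierce"),
--     ("Sana", "Quincy"),
--     ("Arjun", "Reyes"),
--     ("Mina", "Santos"),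
--     ("Theo", "Upton"),
--     ("Yara", "Voss"),
--     ("Ibrahim", "Walker"),
--     ("Lina", "Xu"),
--     ("Dario", "Young"),
--     ("Aisha", "Zane"),
--     ("Emil", "Abbott"),
-- ]
--
-- def _build_roster(patient_count):
--     roster = []
--     for idx in range(patient_count):
--         if idx < len(PATIENT_NAME_POOL):
--             roster.append(PATIENT_NAME_POOL[idx])
--         else:
--             roster.append((f"Patient{idx + 1}", f"Demo{idx + 1}"))
--     return roster
-- ===== SOURCE B (Python) =====
-- PATIENT_NAME_POOL = [
--     ("Amara", "Bennett"),
--     ("Idris", "Cole"),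
--     ("Nia", "Farrow"),
--     ("Kofi", "Hale"),
--     ("Leona", "Ibarra"),
--     ("Mateo", "Jensen"),
--     ("Priya", "Kapoor"),
--     ("Elias", "Navarro"),
--     ("Talia", "Okafor"),
--     ("Rowan", "Pierce"),
--     ("Sana", "Quincy"),
--     ("Arjun", "Reyes"),
--     ("Mina", "Santos"),
--     ("Theo", "Upton"),
--     ("Yara", "Voss"),
--     ("Ibrahim", "Walker"),
--     ("Lina", "Xu"),
--     ("Dario", "Young"),
--     ("Aisha", "Zane"),
--     ("Emil", "Abbott"),
-- ]
--
--
-- def _build_roster(patient_count):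
--     # Build the roster BACK-TO-FRONT: walk idx downward from the last index,
--     # emitting the synthetic overflow names first, then the pool entries,
--     # and reverse once at the end.
--     roster = []
--     idx = patient_count - 1
--     while idx >= len(PATIENT_NAME_POOL):
--         roster.append((f"Patient{idx + 1}", f"Demo{idx + 1}"))
--         idx -= 1
--     while idx >= 0:
--         roster.append(PATIENT_NAME_POOL[idx])
--         idx -= 1
--     roster.reverse()
--     return roster
-- ===== Notes on version B (the rewrite author's own statement) =====
-- stated objective: alternative
-- what changed: Builds the roster back-to-front: two descending while-loops (synthetic overflow names first, then pool entries) append in reverse order and one final reverse() produces the result, replacing A's single ascending loop with a per-index branch.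
import Mathlib
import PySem

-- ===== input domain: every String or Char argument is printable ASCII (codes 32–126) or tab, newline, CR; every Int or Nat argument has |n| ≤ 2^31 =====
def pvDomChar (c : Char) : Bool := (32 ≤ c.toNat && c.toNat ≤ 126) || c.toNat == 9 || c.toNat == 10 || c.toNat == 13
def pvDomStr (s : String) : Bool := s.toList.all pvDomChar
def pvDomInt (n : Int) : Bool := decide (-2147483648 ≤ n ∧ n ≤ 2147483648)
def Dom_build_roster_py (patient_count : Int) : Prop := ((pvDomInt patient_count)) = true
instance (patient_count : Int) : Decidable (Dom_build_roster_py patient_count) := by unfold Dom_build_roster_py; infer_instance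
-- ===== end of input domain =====

-- B builds the roster BACK-TO-FRONT: two descending while-loops (synthetic overflow names
-- first, then pool entries) append in reverse order and one final reverse produces the result.

-- ===== PORT A =====
-- PATIENT_NAME_POOL (module constant used by both versions)
def pvPool : List (String × String) := [
  ("Amara", "Bennett"), ("Idris", "Cole"), ("Nia", "Farrow"), ("Kofi", "Hale"),
  ("Leona", "Ibarra"), ("Mateo", "Jensen"), ("Priya", "Kapoor"), ("Elias", "Navarro"),
  ("Talia", "Okafor"), ("Rowan", "Pierce"), ("Sana", "Quincy"), ("Arjun", "Reyes"),
  ("Mina", "Santos"), ("Theo", "Upton"), ("Yara", "Voss"), ("Ibrahim", "Walker"),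
  ("Lina", "Xu"), ("Dario", "Young"), ("Aisha", "Zane"), ("Emil", "Abbott")]

def build_roster_py (patient_count : Int) : List (String × String) :=
  (PySem.List.pyRange 0 patient_count 1).foldl (fun roster idx =>
    if idx < (pvPool.length : Int) then
      -- PATIENT_NAME_POOL[idx]: the guard keeps idx in range, so the default is never used
      roster ++ [PySem.List.pyGetD pvPool idx ("", "")]
    else
      roster ++ [("Patient" ++ PySem.Int.toStr (idx + 1), "Demo" ++ PySem.Int.toStr (idx + 1))]) []

-- ===== PORT B =====
-- (f"Patient{idx + 1}", f"Demo{idx + 1}")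
def pvSyn (idx : Int) : String × String :=
  ("Patient" ++ PySem.Int.toStr (idx + 1), "Demo" ++ PySem.Int.toStr (idx + 1))

-- first while loop: while idx >= len(PATIENT_NAME_POOL): roster.append(synthetic); idx -= 1
-- returns the final (idx, roster)
def pvTailLoop (idx : Int) (roster : List (String × String)) : Int × List (String × String) :=
  if h : (pvPool.length : Int) ≤ idx then
    pvTailLoop (idx - 1) (roster ++ [pvSyn idx])
  else (idx, roster)
termination_by (idx + 1).toNat
decreasing_by simp at h ⊢; omega

-- second while loop: while idx >= 0: roster.append(PATIENT_NAME_POOL[idx]); idx -= 1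
-- (idx is in range whenever this loop body runs, so the default of pyGetD is never used)
def pvPoolLoop (idx : Int) (roster : List (String × String)) : List (String × String) :=
  if h : 0 ≤ idx then
    pvPoolLoop (idx - 1) (roster ++ [PySem.List.pyGetD pvPool idx ("", "")])
  else roster
termination_by (idx + 1).toNat
decreasing_by simp at h ⊢; omega

def build_roster_py_alt (patient_count : Int) : List (String × String) :=
  let p := pvTailLoop (patient_count - 1) []
  (pvPoolLoop p.1 p.2).reverse

-- ===== PRECONDITION & SPEC =====
def Spec_build_roster_py (patient_count : Int) (out : List (String × String)) : Prop := out = build_roster_py_alt patient_count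
instance (patient_count : Int) (out : List (String × String)) : Decidable (Spec_build_roster_py patient_count out) := by unfold Spec_build_roster_py; infer_instance

-- ===== CLAIM (what is proved, stated in full; the proofs are below) =====
def Claim_equal_build_roster_py : Prop := ∀ (patient_count : Int), Dom_build_roster_py patient_count → Spec_build_roster_py patient_count (build_roster_py patient_count)

-- ===== LEMMAS AND PROOFS =====

-- For a nonnegative bound m: A's per-index map equals pool prefix plus synthetic tail.
theorem pv_key (m : Nat) :
    (PySem.List.pyRange 0 (m : Int) 1).map (fun idx =>
      if idx < (pvPool.length : Int) then PySem.List.pyGetD pvPool idx ("", "")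
      else pvSyn idx)
    = pvPool.take m ++ (PySem.List.pyRange (pvPool.length : Int) (m : Int) 1).map pvSyn := by
  induction m with
  | zero => simp [PySem.List.pyRange_one_eq_nil]
  | succ m ih =>
    have hcast : ((m + 1 : Nat) : Int) = (m : Int) + 1 := by push_cast; ring
    rw [hcast, PySem.List.pyRange_one_succ_right (by positivity), List.map_append, ih,
      List.map_singleton]
    by_cases hm : m < pvPool.length
    · have h1 : ((m : Int) < (pvPool.length : Int)) := by exact_mod_cast hm
      have h2 : PySem.List.pyRange (pvPool.length : Int) ((m : Int) + 1) 1 = [] :=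
        PySem.List.pyRange_one_eq_nil (by omega)
      have h3 : PySem.List.pyRange (pvPool.length : Int) (m : Int) 1 = [] :=
        PySem.List.pyRange_one_eq_nil (by omega)
      simp only [h2, h3, List.map_nil, List.append_nil, if_pos h1,
        PySem.List.pyGetD_natCast, List.take_add_one]
      simp [List.getD, hm]
    · have h1 : ¬ ((m : Int) < (pvPool.length : Int)) := by
        simp only [not_lt] at hm ⊢; exact_mod_cast hm
      have h2 : PySem.List.pyRange (pvPool.length : Int) ((m : Int) + 1) 1 =
          PySem.List.pyRange (pvPool.length : Int) (m : Int) 1 ++ [(m : Int)] :=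
        PySem.List.pyRange_one_succ_right (by omega)
      have h3 : pvPool.take (m + 1) = pvPool.take m := by
        rw [List.take_of_length_le (by omega), List.take_of_length_le (by omega)]
      simp [h2, h3, hm]

-- the tail loop produces the synthetic names for indices [L, L+k) in DESCENDING order
theorem pv_tail (k : Nat) : ∀ (acc : List (String × String)),
    pvTailLoop ((pvPool.length : Int) - 1 + k) acc
      = ((pvPool.length : Int) - 1,
         acc ++ ((PySem.List.pyRange (pvPool.length : Int)
                    ((pvPool.length : Int) + k) 1).map pvSyn).reverse) := by
  induction k with
  | zero =>
    intro acc
    rw [pvTailLoop, dif_neg (by omega)]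
    simp [PySem.List.pyRange_one_eq_nil]
  | succ k ih =>
    intro acc
    have hc : ((pvPool.length : Int) - 1 + ((k + 1 : Nat) : Int))
        = ((pvPool.length : Int) - 1 + k) + 1 := by push_cast; ring
    rw [hc, pvTailLoop, dif_pos (by omega)]
    have hidx : ((pvPool.length : Int) - 1 + (k : Int)) + 1 - 1
        = (pvPool.length : Int) - 1 + (k : Int) := by ring
    rw [hidx, ih]
    have hr : PySem.List.pyRange (pvPool.length : Int) ((pvPool.length : Int) + ((k + 1 : Nat) : Int)) 1
        = PySem.List.pyRange (pvPool.length : Int) ((pvPool.length : Int) + k) 1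
          ++ [(pvPool.length : Int) + k] := by
      have : ((pvPool.length : Int) + ((k + 1 : Nat) : Int)) = ((pvPool.length : Int) + k) + 1 := by
        push_cast; ring
      rw [this, PySem.List.pyRange_one_succ_right (by omega)]
    rw [hr]
    have hsyn : (pvPool.length : Int) - 1 + (k : Int) + 1 = (pvPool.length : Int) + k := by ring
    simp [hsyn]

-- the pool loop appends pool[idx], pool[idx-1], …, pool[0]: the reversed k-prefix of the pool
theorem pv_pool (k : Nat) (hk : k ≤ pvPool.length) : ∀ (acc : List (String × String)),
    pvPoolLoop ((k : Int) - 1) acc = acc ++ (pvPool.take k).reverse := by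
  induction k with
  | zero =>
    intro acc
    rw [pvPoolLoop, dif_neg (by omega)]
    simp
  | succ k ih =>
    intro acc
    have hc : ((k + 1 : Nat) : Int) - 1 = (k : Int) := by push_cast; ring
    rw [hc, pvPoolLoop, dif_pos (by omega)]
    have hidx : (k : Int) - 1 = ((k : Nat) : Int) - 1 := by norm_num
    rw [hidx, ih (by omega)]
    have hk' : k < pvPool.length := by omega
    have hstep : List.take (k + 1) pvPool = List.take k pvPool ++ [pvPool[k]] := by
      rw [List.take_add_one, List.getElem?_eq_getElem hk']; rfl
    rw [PySem.List.pyGetD_natCast, hstep, List.reverse_append,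
      List.getD_eq_getElem pvPool ("", "") hk']
    simp

-- the let-binding in build_roster_py_alt, unfolded
theorem pv_alt_eq (n : Int) : build_roster_py_alt n
    = (pvPoolLoop (pvTailLoop (n - 1) []).1 (pvTailLoop (n - 1) []).2).reverse := rfl

-- if the count is nonpositive, the loops never run
theorem pv_neg (n : Int) (hn : n ≤ 0) : build_roster_py_alt n = [] := by
  rw [pv_alt_eq, pvTailLoop, dif_neg (by simp [pvPool]; omega)]
  rw [pvPoolLoop, dif_neg (by omega)]
  rfl

theorem pv_eq (patient_count : Int) :
    build_roster_py patient_count = build_roster_py_alt patient_count := by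
  unfold build_roster_py
  have hfun : (fun (roster : List (String × String)) (idx : Int) =>
      if idx < (pvPool.length : Int) then
        roster ++ [PySem.List.pyGetD pvPool idx ("", "")]
      else
        roster ++ [("Patient" ++ PySem.Int.toStr (idx + 1), "Demo" ++ PySem.Int.toStr (idx + 1))])
      = (fun roster idx => roster ++
        [if idx < (pvPool.length : Int) then PySem.List.pyGetD pvPool idx ("", "")
         else pvSyn idx]) := by
    funext roster idx; split <;> rfl
  rw [hfun, PySem.List.foldl_append_singleton_eq_map]
  by_cases hn : 0 < patient_count
  · have h2 : patient_count = ((patient_count.toNat : Nat) : Int) := by omega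
    rw [h2, pv_key patient_count.toNat]
    by_cases hbig : pvPool.length < patient_count.toNat
    · -- overflow case: tail loop runs, then the pool loop consumes the whole pool
      have hk : ((patient_count.toNat : Nat) : Int) - 1
          = (pvPool.length : Int) - 1 + ((patient_count.toNat - pvPool.length : Nat) : Int) := by
        push_cast; omega
      have hb : (pvPool.length : Int) + ((patient_count.toNat - pvPool.length : Nat) : Int)
          = ((patient_count.toNat : Nat) : Int) := by push_cast; omega
      rw [pv_alt_eq, hk, pv_tail, hb, pv_pool pvPool.length le_rfl]
      simp [List.take_of_length_le (show pvPool.length ≤ patient_count.toNat by omega)]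
    · -- pool-only case: the tail loop exits immediately
      push_neg at hbig
      have h3 : PySem.List.pyRange (pvPool.length : Int) ((patient_count.toNat : Nat) : Int) 1 = [] :=
        PySem.List.pyRange_one_eq_nil (by exact_mod_cast hbig)
      rw [pv_alt_eq, pvTailLoop, dif_neg (by push_cast; omega), pv_pool patient_count.toNat hbig]
      simp [h3]
      have hlen : pvPool.length = 20 := rfl
      exact PySem.List.pyRange_one_eq_nil (by omega)
  · push_neg at hn
    rw [pv_neg patient_count hn, PySem.List.pyRange_one_eq_nil (by omega)]
    rfl

-- ===== VERDICT (by name: the statement is the Claim_ definition above) =====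
theorem build_roster_py_spec : Claim_equal_build_roster_py := by
  intro patient_count _
  exact pv_eq patient_count
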